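-- pv_equiv track=rewrite | github.com/DimaZzZz101/Yandex_Practicum_Algorithms | Sprint_4/Final_tasks/Task_1/search_engine.py | search_engine
-- ===== SOURCE A (Python) =====
-- from heapq import nsmallest
--
-- LIMIT = 5
--
-- def search_engine(query, index):
--     relevant_results = {}
--
--     for word in set(query):
--         index_item = index.get(word)
--
--         if index_item is None:
--             continue
--
--         for document_idx, count in index_item:
--             relevance = relevant_results.get(document_idx)
--
--             if relevance is None:
--                 relevant_results[document_idx] = count
--             else:
--                 relevant_results[document_idx] += count
--
--     return [result[0] for result in nsmallest(LIMIT, relevant_results.items(), key=lambda item: (-item[1], item[0]))]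
-- ===== SOURCE B (Python) =====
-- LIMIT = 5
--
-- def search_engine(query, index):
--     words = set(query)
--     contributions = []
--     for word, postings in index.items():
--         if word in words:
--             contributions.extend(postings)
--     contributions.sort()
--     totals = []
--     current = None
--     for doc, cnt in contributions:
--         if current is not None and current[0] == doc:
--             current = (doc, current[1] + cnt)
--         else:
--             if current is not None:
--                 totals.append(current)
--             current = (doc, cnt)
--     if current is not None:
--         totals.append(current)
--     totals.sort(key=lambda t: (-t[1], t[0]))
--     return [doc for doc, _ in totals[:LIMIT]]
-- ===== Notes on version B (the rewrite author's own statement) =====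
-- stated objective: alternative
-- what changed: B drops the hash-map aggregation and the heap: it collects all relevant (doc,count) contributions into one flat list, sorts it by document id and sums adjacent runs (sort-then-scan grouping instead of dict aggregation), then takes the first LIMIT of a full sort by (-count, doc) instead of heapq.nsmallest.
import Mathlib
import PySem

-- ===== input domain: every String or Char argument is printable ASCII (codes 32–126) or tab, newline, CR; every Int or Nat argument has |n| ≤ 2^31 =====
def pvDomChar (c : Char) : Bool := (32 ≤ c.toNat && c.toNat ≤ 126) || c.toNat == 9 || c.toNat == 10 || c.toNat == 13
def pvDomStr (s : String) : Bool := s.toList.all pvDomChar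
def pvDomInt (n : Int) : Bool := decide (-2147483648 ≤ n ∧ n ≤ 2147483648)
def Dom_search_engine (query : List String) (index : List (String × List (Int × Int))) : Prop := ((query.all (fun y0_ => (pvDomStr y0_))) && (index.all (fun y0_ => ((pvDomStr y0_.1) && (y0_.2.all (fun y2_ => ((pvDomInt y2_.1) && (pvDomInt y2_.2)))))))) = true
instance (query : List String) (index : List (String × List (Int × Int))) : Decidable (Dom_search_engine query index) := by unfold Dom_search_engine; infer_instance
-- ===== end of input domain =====

-- B replaces the hash-map aggregation and the heap by a sort-then-scan: it flattens the relevant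
-- postings into one contribution list, sorts it by document id and sums adjacent runs, then takes
-- the first LIMIT of a full sort by (-count, doc); same return value, similar cost ("alternative").

-- ===== PORT A =====
-- heapq.nsmallest(LIMIT, xs, key) is documented (and implemented) to equal sorted(xs, key=key)[:LIMIT]
def search_engine (query : List String) (index : List (String × List (Int × Int))) : List Int :=
  let idx : PySem.Dict String (List (Int × Int)) := PySem.Dict.ofList index
  let relevantResults : PySem.Dict Int Int :=
    (PySem.Set.ofList query).foldl (fun d word =>
      match idx.get? word with
      | none => d
      | some indexItem =>
          indexItem.foldl (fun d dc =>
            match d.get? dc.1 with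
            | none => d.insert dc.1 dc.2
            | some relevance => d.insert dc.1 (relevance + dc.2)) d) PySem.Dict.empty
  ((PySem.List.sorted2 relevantResults.items (fun item => -item.2) (fun item => item.1)).take 5).map (fun r => r.1)

-- ===== PORT B =====
def search_engine_alt (query : List String) (index : List (String × List (Int × Int))) : List Int :=
  let words : PySem.Set String := PySem.Set.ofList query
  let contributions : List (Int × Int) :=
    index.foldl (fun acc e => if PySem.Set.contains words e.1 then acc ++ e.2 else acc) []
  -- contributions.sort() on int pairs = lexicographic tuple sort
  let sortedC : List (Int × Int) := PySem.List.sorted2 contributions (fun p => p.1) (fun p => p.2)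
  let st : List (Int × Int) × Option (Int × Int) :=
    sortedC.foldl (fun s dc =>
      match s.2 with
      | some cur => if cur.1 = dc.1 then (s.1, some (dc.1, cur.2 + dc.2))
                    else (s.1 ++ [cur], some dc)
      | none => (s.1, some dc)) ([], none)
  let totals : List (Int × Int) := match st.2 with | some cur => st.1 ++ [cur] | none => st.1
  ((PySem.List.sorted2 totals (fun t => -t.2) (fun t => t.1)).take 5).map (fun t => t.1)

-- ===== PRECONDITION & SPEC =====
-- Pre_ excludes association lists with duplicate keys: in Python `index` is a dict, so such a
-- list never corresponds to a Python input (dict keys are unique); the ports read it differently there.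
def Pre_search_engine (_query : List String) (index : List (String × List (Int × Int))) : Prop :=
  (index.map (fun e => e.1)).Nodup
instance (query : List String) (index : List (String × List (Int × Int))) : Decidable (Pre_search_engine query index) := by unfold Pre_search_engine; infer_instance
def pvWitness_search_engine : List String × (List (String × List (Int × Int))) :=
  (["a", "b"], [("a", [(1, 2), (3, 1)]), ("c", [(1, 5)])])
def Spec_search_engine (query : List String) (index : List (String × List (Int × Int))) (out : List Int) : Prop := out = search_engine_alt query index
instance (query : List String) (index : List (String × List (Int × Int))) (out : List Int) : Decidable (Spec_search_engine query index out) := by unfold Spec_search_engine; infer_instance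

-- ===== CLAIM (what is proved, stated in full; the proofs are below) =====
def Claim_equal_search_engine : Prop := ∀ (query : List String) (index : List (String × List (Int × Int))), Dom_search_engine query index → Pre_search_engine query index → Spec_search_engine query index (search_engine query index)

-- ===== LEMMAS AND PROOFS =====

-- the per-(document, count) aggregation step A's dict loop performs
def aggStep (d : PySem.Dict Int Int) (dc : Int × Int) : PySem.Dict Int Int :=
  d.insert dc.1 (d.getD dc.1 0 + dc.2)

lemma stepA_eq_aggStep :
    (fun (d : PySem.Dict Int Int) (dc : Int × Int) =>
      match d.get? dc.1 with
      | none => d.insert dc.1 dc.2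
      | some relevance => d.insert dc.1 (relevance + dc.2)) = aggStep := by
  funext d dc
  cases h : d.get? dc.1 with
  | none => simp [aggStep, PySem.Dict.getD_eq_get?_getD, h]
  | some r => simp [aggStep, PySem.Dict.getD_eq_get?_getD, h]

lemma getD_aggFold (L : List (Int × Int)) (d : PySem.Dict Int Int) (k : Int) :
    (L.foldl aggStep d).getD k 0
      = d.getD k 0 + ((L.filter (fun dc => dc.1 == k)).map (fun dc => dc.2)).sum := by
  induction L generalizing d with
  | nil => simp
  | cons p t ih =>
      by_cases h : p.1 = k
      · simp [List.foldl_cons, ih, aggStep, h]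
        omega
      · simp [List.foldl_cons, ih, aggStep, PySem.Dict.getD_insert, h, Ne.symm h]

lemma keys_aggFold (L : List (Int × Int)) (d : PySem.Dict Int Int) :
    (L.foldl aggStep d).keys = PySem.Set.update d.keys (L.map (fun dc => dc.1)) := by
  exact PySem.Dict.keys_foldl_insert_key L (fun dc => dc.1) (fun d dc => d.getD dc.1 0 + dc.2) d

lemma flatMap_filter_nil {α β : Type} (l : List α) (p : α → Bool) (g : α → List β)
    (h : ∀ w, p w = false → g w = []) : l.flatMap g = (l.filter p).flatMap g := by
  induction l with
  | nil => rfl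
  | cons x t ih =>
      cases hx : p x with
      | true => simp [List.flatMap_cons, hx, ih]
      | false => simp [List.flatMap_cons, hx, ih, h x hx]

lemma sorted2_eq_sorted_lex (xs : List (Int × Int)) (k1 k2 : (Int × Int) → Int) :
    PySem.List.sorted2 xs k1 k2 = PySem.List.sorted xs (fun x => toLex (k1 x, k2 x)) := by
  rw [PySem.List.sorted_eq_foldl_insertBy]
  show xs.foldl (fun acc x => PySem.List.insertBy _ x acc) [] = _
  have hb : (fun (a b : Int × Int) => decide (k1 a < k1 b) || (!decide (k1 b < k1 a) && decide (k2 a < k2 b)))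
      = (fun (a b : Int × Int) => decide ((fun x => toLex (k1 x, k2 x)) a < (fun x => toLex (k1 x, k2 x)) b)) := by
    funext a b
    by_cases h1 : k1 a < k1 b <;> by_cases h2 : k1 b < k1 a <;> by_cases h3 : k2 a < k2 b <;>
      simp [h1, h2, h3, Prod.Lex.lt_iff] <;> omega
  rw [hb]
  simp

lemma lexKey_injective : Function.Injective (fun (it : Int × Int) => toLex (-it.2, it.1)) := by
  intro a b h
  have h' : (-a.2, a.1) = (-b.2, b.1) := h
  have h1 := congrArg Prod.fst h'
  have h2 := congrArg Prod.snd h'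
  simp at h1 h2
  exact Prod.ext h2 h1

-- the grouping step of B's scan (literally the lambda in the port) and its recursive description
def gStep (s : List (Int × Int) × Option (Int × Int)) (dc : Int × Int) : List (Int × Int) × Option (Int × Int) :=
  match s.2 with
  | some cur => if cur.1 = dc.1 then (s.1, some (dc.1, cur.2 + dc.2))
                else (s.1 ++ [cur], some dc)
  | none => (s.1, some dc)

def gFinish (s : List (Int × Int) × Option (Int × Int)) : List (Int × Int) :=
  match s.2 with | some cur => s.1 ++ [cur] | none => s.1

def run : List (Int × Int) → (Int × Int) → List (Int × Int)
  | [], cur => [cur]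
  | dc :: t, cur => if cur.1 = dc.1 then run t (dc.1, cur.2 + dc.2) else cur :: run t dc

lemma fold_run (L : List (Int × Int)) (done : List (Int × Int)) (cur : Int × Int) :
    gFinish (L.foldl gStep (done, some cur)) = done ++ run L cur := by
  induction L generalizing done cur with
  | nil => simp [gFinish, run]
  | cons dc t ih =>
      by_cases h : cur.1 = dc.1
      · simp [List.foldl_cons, gStep, h, ih, run]
      · simp [List.foldl_cons, gStep, h, ih, run]

lemma run_keys (t : List (Int × Int)) (cur : Int × Int) (k : Int) :
    k ∈ (run t cur).map Prod.fst ↔ k = cur.1 ∨ k ∈ t.map Prod.fst := by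
  induction t generalizing cur with
  | nil => simp [run]
  | cons dc t ih =>
      by_cases h : cur.1 = dc.1
      · simp only [run, h, if_pos trivial]
        rw [ih]
        simp
      · simp [run, h, ih]

lemma run_keys_le (t : List (Int × Int)) (cur : Int × Int)
    (hc : ∀ x ∈ t, cur.1 ≤ x.1) : ∀ p ∈ run t cur, cur.1 ≤ p.1 := by
  intro p hp
  have hk : p.1 = cur.1 ∨ p.1 ∈ t.map Prod.fst :=
    (run_keys t cur p.1).mp (List.mem_map.mpr ⟨p, hp, rfl⟩)
  rcases hk with hk | hk
  · omega
  · rcases List.mem_map.mp hk with ⟨x, hx, hx1⟩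
    have := hc x hx
    omega

lemma run_keys_lt (t : List (Int × Int)) (cur : Int × Int)
    (hs : t.Pairwise (fun a b => a.1 ≤ b.1)) (hc : ∀ x ∈ t, cur.1 ≤ x.1) :
    (run t cur).Pairwise (fun a b => a.1 < b.1) := by
  induction t generalizing cur with
  | nil => simp [run]
  | cons dc t ih =>
      rcases List.pairwise_cons.mp hs with ⟨hdc, ht⟩
      by_cases h : cur.1 = dc.1
      · simpa [run, h] using ih (dc.1, cur.2 + dc.2) ht (fun x hx => hdc x hx)
      · have hlt : cur.1 < dc.1 := lt_of_le_of_ne (hc dc List.mem_cons_self) h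
        have hhead : ∀ p ∈ run t dc, cur.1 < p.1 := fun p hp =>
          lt_of_lt_of_le hlt (run_keys_le t dc hdc p hp)
        have hrec := ih dc ht hdc
        simpa [run, h] using List.pairwise_cons.mpr ⟨hhead, hrec⟩

lemma run_val (t : List (Int × Int)) (cur : Int × Int)
    (hs : t.Pairwise (fun a b => a.1 ≤ b.1)) (hc : ∀ x ∈ t, cur.1 ≤ x.1) :
    ∀ p ∈ run t cur, p.2 = (((cur :: t).filter (fun x => x.1 == p.1)).map Prod.snd).sum := by
  induction t generalizing cur with
  | nil =>
      intro p hp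
      simp [run] at hp
      subst hp
      simp
  | cons dc t ih =>
      rcases List.pairwise_cons.mp hs with ⟨hdc, ht⟩
      intro p hp
      by_cases h : cur.1 = dc.1
      · have hp' : p ∈ run t (dc.1, cur.2 + dc.2) := by simpa [run, h] using hp
        have hval := ih (dc.1, cur.2 + dc.2) ht (fun x hx => hdc x hx) p hp'
        by_cases hk : dc.1 = p.1
        · rw [hval]
          simp [hk, h.trans hk]
          ring
        · have hck : ¬ cur.1 = p.1 := fun hh => hk (h.symm.trans hh)
          rw [hval]
          simp [hk, hck]
      · have hlt : cur.1 < dc.1 := lt_of_le_of_ne (hc dc List.mem_cons_self) h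
        rcases (by simpa [run, h] using hp : p = cur ∨ p ∈ run t dc) with hpc | hpr
        · subst hpc
          have hnil : (dc :: t).filter (fun x => x.1 == p.1) = [] := by
            apply List.filter_eq_nil_iff.mpr
            intro x hx
            have : p.1 < x.1 := by
              rcases List.mem_cons.mp hx with rfl | hx'
              · exact hlt
              · exact lt_of_lt_of_le hlt (hdc x hx')
            simp
            omega
          simp [hnil]
        · have hge : dc.1 ≤ p.1 := run_keys_le t dc hdc p hpr
          have hne : ¬ (cur.1 == p.1) = true := by simp; omega
          have hval := ih dc ht hdc p hpr
          rw [hval]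
          simp [List.filter_cons, hne]

-- ===== VERDICT (by name: the statement is the Claim_ definition above) =====
theorem search_engine_spec : Claim_equal_search_engine := by
  intro query index _hdom hpre
  unfold Spec_search_engine
  -- restate both ports with the proof-side names (definitional equalities)
  have hAeq : search_engine query index
      = ((PySem.List.sorted2 ((PySem.Set.ofList query).foldl (fun d word =>
            match (PySem.Dict.ofList index).get? word with
            | none => d
            | some indexItem =>
                indexItem.foldl (fun d dc =>
                  match d.get? dc.1 with
                  | none => d.insert dc.1 dc.2
                  | some relevance => d.insert dc.1 (relevance + dc.2)) d) PySem.Dict.empty).items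
          (fun item => -item.2) (fun item => item.1)).take 5).map (fun r => r.1) := rfl
  have hBeq : search_engine_alt query index
      = ((PySem.List.sorted2 (gFinish ((PySem.List.sorted2
            (index.foldl (fun acc e => if PySem.Set.contains (PySem.Set.ofList query) e.1 then acc ++ e.2 else acc) [])
            (fun p => p.1) (fun p => p.2)).foldl gStep ([], none)))
          (fun t => -t.2) (fun t => t.1)).take 5).map (fun t => t.1) := rfl
  rw [hAeq, hBeq]
  set wsQ : PySem.Set String := PySem.Set.ofList query with hws
  set D : PySem.Dict String (List (Int × Int)) := PySem.Dict.ofList index with hD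
  -- the index dict's items are exactly `index` (keys are Nodup by Pre_)
  have hitems : D.items = index := by
    rw [hD]
    show (PySem.Dict.update PySem.Dict.empty index).items = index
    unfold PySem.Dict.update
    rw [PySem.Dict.items_foldl_insert_fresh index (fun p => p.1) (fun p => p.2) PySem.Dict.empty
      (fun a _ => PySem.Dict.contains_empty _) hpre]
    simp [show PySem.Dict.empty.items = ([] : List (String × List (Int × Int))) from rfl]
  have hkeysDnd : D.keys.Nodup := by
    have : D.keys = index.map (fun e => e.1) := by
      show D.items.map (fun x => x.1) = _
      rw [hitems]
    rw [this]; exact hpre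
  -- A's aggregation is a fold of aggStep over the flat contribution list CA
  have hA : (wsQ.foldl (fun d word =>
        match D.get? word with
        | none => d
        | some indexItem =>
            indexItem.foldl (fun d dc =>
              match d.get? dc.1 with
              | none => d.insert dc.1 dc.2
              | some relevance => d.insert dc.1 (relevance + dc.2)) d) PySem.Dict.empty)
      = (wsQ.flatMap (fun w => D.getD w [])).foldl aggStep PySem.Dict.empty := by
    rw [List.foldl_flatMap]
    apply PySem.List.foldl_congr_mem
    intro d w _
    rw [stepA_eq_aggStep]
    cases h : D.get? w with
    | none => rw [PySem.Dict.getD_eq_get?_getD, h]; rfl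
    | some it => rw [PySem.Dict.getD_eq_get?_getD, h]; rfl
  -- B's contribution list
  have hB : (index.foldl (fun acc e => if PySem.Set.contains wsQ e.1 then acc ++ e.2 else acc) ([] : List (Int × Int)))
      = (index.filter (fun e => PySem.Set.contains wsQ e.1)).flatMap (fun e => e.2) := by
    rw [PySem.List.foldl_ite_eq_foldl_filter (fun e => PySem.Set.contains wsQ e.1 = true)
      (fun acc (e : String × List (Int × Int)) => acc ++ e.2) index ([] : List (Int × Int))]
    rw [PySem.List.foldl_append_eq_flatMap]
    simp only [Bool.decide_eq_true, List.nil_append]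
  rw [hA, hB]
  set CA : List (Int × Int) := wsQ.flatMap (fun w => D.getD w []) with hCA
  set CB : List (Int × Int) := (index.filter (fun e => PySem.Set.contains wsQ e.1)).flatMap (fun e => e.2) with hCB
  -- the two contribution lists are permutations of each other
  have hperm : CA.Perm CB := by
    rw [hCA, hCB]
    have hstep1 : wsQ.flatMap (fun w => D.getD w []) = (wsQ.filter (fun w => D.contains w)).flatMap (fun w => D.getD w []) :=
      flatMap_filter_nil wsQ (fun w => D.contains w) _ (fun w hw => PySem.Dict.getD_of_not_contains D [] hw)
    rw [hstep1]
    have hstep2 : (wsQ.filter (fun w => D.contains w)).flatMap (fun w => D.getD w [])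
        = ((wsQ.filter (fun w => D.contains w)).map (fun w => (w, D.getD w []))).flatMap (fun e => e.2) := by
      rw [List.flatMap_map]
    rw [hstep2]
    apply List.Perm.flatMap _ (fun a _ => List.Perm.refl _)
    have hndA : ((wsQ.filter (fun w => D.contains w)).map (fun w => (w, D.getD w []))).Nodup := by
      apply List.Nodup.map
      · intro a b h; exact congrArg Prod.fst h
      · exact (PySem.Set.nodup_ofList query).filter _
    have hndB : (index.filter (fun e => PySem.Set.contains wsQ e.1)).Nodup := by
      exact List.Sublist.nodup List.filter_sublist (List.Nodup.of_map _ hpre)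
    rw [List.perm_ext_iff_of_nodup hndA hndB]
    intro e
    constructor
    · intro he
      rcases List.mem_map.mp he with ⟨w, hw, hwe⟩
      rcases List.mem_filter.mp hw with ⟨hwq, hwc⟩
      subst hwe
      rw [List.mem_filter]
      refine ⟨?_, ?_⟩
      · have hsome : ∃ v, D.get? w = some v := by
          have := PySem.Dict.contains_eq_isSome_get? D w
          rw [hwc] at this
          exact Option.isSome_iff_exists.mp this.symm
        rcases hsome with ⟨v, hv⟩
        have : D.getD w [] = v := PySem.Dict.getD_of_get?_eq_some D [] hv
        rw [this, ← hitems]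
        exact (PySem.Dict.get?_eq_some_iff_mem_items D w v hkeysDnd).mp hv
      · simpa using List.elem_iff.mpr hwq
    · intro he
      rcases List.mem_filter.mp he with ⟨hei, hec⟩
      have hget : D.get? e.1 = some e.2 := by
        rw [PySem.Dict.get?_eq_some_iff_mem_items D e.1 e.2 hkeysDnd, hitems]
        exact hei
      have hcont : D.contains e.1 = true := by
        rw [PySem.Dict.contains_eq_isSome_get?, hget]; rfl
      have hgd : D.getD e.1 [] = e.2 := PySem.Dict.getD_of_get?_eq_some D [] hget
      apply List.mem_map.mpr
      refine ⟨e.1, List.mem_filter.mpr ⟨?_, hcont⟩, ?_⟩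
      · have : List.contains wsQ e.1 = true := hec
        exact List.elem_iff.mp this
      · rw [hgd]
  set S : List (Int × Int) := PySem.List.sorted2 CB (fun p => p.1) (fun p => p.2) with hSdef
  have hSp : S.Perm CB := PySem.List.sorted2_perm CB _ _ false
  have hSA : S.Perm CA := hSp.trans hperm.symm
  -- A's aggregated dict: nodup keys, key membership, values
  set dictA : PySem.Dict Int Int := CA.foldl aggStep PySem.Dict.empty with hdA
  have hkeysAnd : dictA.keys.Nodup := by
    rw [hdA]
    exact PySem.Dict.nodup_keys_foldl_insert_key CA (fun dc => dc.1) _ _ PySem.Dict.nodup_keys_empty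
  have hmemA : ∀ k, k ∈ dictA.keys ↔ k ∈ CA.map (fun dc => dc.1) := by
    intro k
    rw [hdA, keys_aggFold]
    show k ∈ PySem.Set.update ([] : List Int) (CA.map (fun dc => dc.1)) ↔ _
    have hupd : ∀ l : List Int, PySem.Set.update ([] : List Int) l = PySem.Set.ofList l :=
      fun l => (PySem.Set.ofList_eq_foldl l).symm
    rw [hupd, PySem.Set.mem_ofList]
  have hgdA : ∀ k, dictA.getD k 0 = ((CA.filter (fun dc => dc.1 == k)).map (fun dc => dc.2)).sum := by
    intro k
    rw [hdA, getD_aggFold]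
    rw [show (PySem.Dict.empty : PySem.Dict Int Int).getD k 0 = 0 from rfl, zero_add]
  have hitemsA : dictA.items
      = dictA.keys.map (fun k => (k, ((CA.filter (fun dc => dc.1 == k)).map (fun dc => dc.2)).sum)) := by
    rw [PySem.Dict.items_eq_map_keys dictA hkeysAnd 0]
    exact List.map_congr_left (fun k _ => by rw [hgdA k])
  -- the sorted contribution list is pairwise nondecreasing in the document id
  have hpwS : S.Pairwise (fun a b => a.1 ≤ b.1) := by
    rw [hSdef, sorted2_eq_sorted_lex]
    refine List.Pairwise.imp ?_ (PySem.List.sorted_pairwise CB _)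
    intro a b hab
    rcases Prod.Lex.le_iff.mp hab with h | ⟨h1, _⟩
    · exact le_of_lt h
    · exact le_of_eq h1
  cases hS2 : S with
  | nil =>
      rw [hS2] at hSA
      have hCAnil : CA = [] := hSA.symm.eq_nil
      rw [hdA, hCAnil]
      rfl
  | cons c t =>
      rw [hS2] at hSA hpwS
      rcases List.pairwise_cons.mp hpwS with ⟨hcle, htpw⟩
      have hfold : gFinish ((c :: t).foldl gStep ([], none)) = run t c := by
        show gFinish (t.foldl gStep (gStep ([], none) c)) = run t c
        rw [show gStep ([], none) c = ([], some c) from rfl]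
        simpa using fold_run t [] c
      rw [hfold]
      -- totals facts
      have hkTnd : ((run t c).map Prod.fst).Nodup :=
        List.pairwise_map.mpr ((run_keys_lt t c htpw hcle).imp (fun h => ne_of_lt h))
      have hvalT : ∀ p ∈ run t c, p.2 = ((CA.filter (fun dc => dc.1 == p.1)).map (fun dc => dc.2)).sum := by
        intro p hp
        have h1 := run_val t c htpw hcle p hp
        have hperm2 : ((c :: t).filter (fun x => x.1 == p.1)).Perm (CA.filter (fun dc => dc.1 == p.1)) :=
          hSA.filter _
        calc p.2 = (((c :: t).filter (fun x => x.1 == p.1)).map (fun dc => dc.2)).sum := h1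
          _ = ((CA.filter (fun dc => dc.1 == p.1)).map (fun dc => dc.2)).sum := (hperm2.map _).sum_eq
      have hTmap : run t c
          = ((run t c).map Prod.fst).map (fun k => (k, ((CA.filter (fun dc => dc.1 == k)).map (fun dc => dc.2)).sum)) := by
        rw [List.map_map]
        conv_lhs => rw [← List.map_id (run t c)]
        apply List.map_congr_left
        intro p hp
        exact Prod.ext_iff.mpr ⟨rfl, hvalT p hp⟩
      have hkeysPerm : ((run t c).map Prod.fst).Perm dictA.keys := by
        apply (List.perm_ext_iff_of_nodup hkTnd hkeysAnd).mpr
        intro k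
        rw [hmemA k, run_keys]
        have hmS : k ∈ (c :: t).map (fun dc => dc.1) ↔ k ∈ CA.map (fun dc => dc.1) := (hSA.map _).mem_iff
        constructor
        · intro h
          apply hmS.mp
          rw [List.map_cons]
          rcases h with h | h
          · rw [h]; exact List.mem_cons_self
          · exact List.mem_cons_of_mem _ h
        · intro h
          have hm := hmS.mpr h
          rw [List.map_cons] at hm
          rcases List.mem_cons.mp hm with h1 | h1
          · exact Or.inl h1
          · exact Or.inr h1
      have hip : dictA.items.Perm (run t c) := by
        rw [hitemsA, hTmap]
        exact (hkeysPerm.map _).symm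
      rw [sorted2_eq_sorted_lex, sorted2_eq_sorted_lex,
        PySem.List.sorted_eq_sorted_of_perm _ _ (fun it => toLex (-it.2, it.1)) lexKey_injective hip]
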